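-- pv_equiv track=rewrite | github.com/JuRehl/Teoria-De-algoritmos-buchwald-FIUBA | Primer parcial/Programacion dinamica/programacion_dinamica.py | max_precio_con_todos
-- ===== SOURCE A (Python) =====
-- def max_precio_con_todos(productos, K):
--     n = len(productos)
--
--     # Paso 1: Verificar si es posible incluir al menos uno de cada producto
--     peso_minimo = sum(p[0] for p in productos)
--     if peso_minimo > K:
--         return -1  # No hay solución
--
--     # Paso 2: Incluir obligatoriamente 1 unidad de cada producto
--     precio_base = sum(p[1] for p in productos)
--     peso_restante = K - peso_minimo
--
--     # Paso 3: Resolver problema de mochila ilimitada con el peso restante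
--     dp = [0] * (peso_restante + 1)
--
--     for peso, precio in productos:
--         for k in range(peso, peso_restante + 1):
--             dp[k] = max(dp[k], dp[k - peso] + precio)
--
--     return precio_base + dp[peso_restante]
-- ===== SOURCE B (Python) =====
-- def max_precio_con_todos(productos, K):
--     # Phase 1: everything must fit at least once.
--     peso_minimo = sum(p for p, _ in productos)
--     if peso_minimo > K:
--         return -1
--     # Phase 2: one mandatory unit of each product.
--     precio_base = sum(pr for _, pr in productos)
--     peso_restante = K - peso_minimo
--     # Phase 3, top-down: discover the set of capacities actually reachable
--     # from peso_restante by removing items (graph reachability with an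
--     # explicit stack), then evaluate the unbounded-knapsack value function
--     # only on those capacities, in increasing (= dependency) order, in a
--     # sparse memo dict.  Unreachable capacities are never touched.
--     seen = {peso_restante}
--     frontier = [peso_restante]
--     while frontier:
--         c = frontier.pop()
--         for p, _ in productos:
--             if 0 < p <= c and c - p not in seen:
--                 seen.add(c - p)
--                 frontier.append(c - p)
--     memo = {}
--     for c in sorted(seen):
--         best = 0
--         for p, pr in productos:
--             if 0 < p <= c:
--                 v = memo[c - p] + pr
--                 if v > best:
--                     best = v
--         memo[c] = best
--     return precio_base + memo[peso_restante]
-- ===== Notes on version B (the rewrite author's own statement) =====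
-- stated objective: alternative
-- what changed: Phase 3 is rewritten from A's dense bottom-up DP (a dp array over every capacity 0..peso_restante, one in-place relaxation sweep per product) to a top-down scheme: an explicit-stack reachability search collects only the capacities reachable from peso_restante by removing items, and the value function is then evaluated over that sparse set in increasing (dependency) order in a memo dict.
-- outside the precondition, e.g. on max_precio_con_todos([(0, 5), (2, 3)], 4): A returns 16, B returns 11; on max_precio_con_todos([(-1, 5)], 3): A raises IndexError, B returns 5
import Mathlib
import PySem

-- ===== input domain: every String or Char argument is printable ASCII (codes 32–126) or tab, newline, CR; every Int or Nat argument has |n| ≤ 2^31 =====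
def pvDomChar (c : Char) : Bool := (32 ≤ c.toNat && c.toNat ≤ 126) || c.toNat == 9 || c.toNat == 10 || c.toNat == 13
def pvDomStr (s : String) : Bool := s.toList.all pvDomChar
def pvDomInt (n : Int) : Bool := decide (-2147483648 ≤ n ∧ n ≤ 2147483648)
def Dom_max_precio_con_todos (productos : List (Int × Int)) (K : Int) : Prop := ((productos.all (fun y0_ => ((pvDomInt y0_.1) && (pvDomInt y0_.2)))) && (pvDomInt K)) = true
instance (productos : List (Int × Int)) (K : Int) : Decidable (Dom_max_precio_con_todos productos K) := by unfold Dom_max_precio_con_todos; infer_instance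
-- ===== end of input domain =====

-- B replaces A's dense bottom-up dp array by a top-down scheme: an explicit-stack
-- reachability search over capacities followed by evaluation of the value function on
-- the reachable capacities only, in increasing order, in a sparse memo dict
-- (alternative decomposition, same cost class).


-- ===== PORT A =====
-- inner loop 'for k in range(peso, peso_restante + 1): dp[k] = max(dp[k], dp[k-peso] + precio)'
def pvRelaxItem (peso_restante : Int) (peso precio : Int) (dp : List Int) : List Int :=
  (PySem.List.pyRange peso (peso_restante + 1) 1).foldl
    (fun dp k =>
      PySem.List.pySetD dp k
        (max (PySem.List.pyGetD dp k 0) (PySem.List.pyGetD dp (k - peso) 0 + precio)))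
    dp

def max_precio_con_todos (productos : List (Int × Int)) (K : Int) : Int :=
  let peso_minimo := (productos.map Prod.fst).sum
  if peso_minimo > K then -1
  else
    let precio_base := (productos.map Prod.snd).sum
    let peso_restante := K - peso_minimo
    let dp := List.replicate (peso_restante + 1).toNat 0
    let dp := productos.foldl (fun dp pp => pvRelaxItem peso_restante pp.1 pp.2 dp) dp
    precio_base + PySem.List.pyGetD dp peso_restante 0

-- ===== PORT B =====
-- Python's `seen` is a set (PySem.Set invariant: built with Set.add); `frontier` is a
-- LIFO stack: Python appends and pops at the END, the port pushes and pops at the HEAD —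
-- the same LIFO discipline, and only the set of discovered capacities is used later.
-- one step of the inner 'for p, _ in productos' of the reachability loop
def pvSearchStep (c : Int) (st : List Int × List Int) (pp : Int × Int) : List Int × List Int :=
  if 0 < pp.1 ∧ pp.1 ≤ c ∧ (c - pp.1) ∉ st.1 then
    (PySem.Set.add st.1 (c - pp.1), (c - pp.1) :: st.2)
  else st

-- the 'while frontier:' loop; the fuel only makes it total: one capacity is popped per
-- iteration and each capacity enters the frontier at most once, so (R+1).toNat + 1
-- iterations always suffice (proved below in pvBfs_spec).
def pvBfsLoop (productos : List (Int × Int)) : Nat → List Int → List Int → List Int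
  | 0, seen, _ => seen
  | _ + 1, seen, [] => seen
  | fuel + 1, seen, c :: rest =>
      let st := productos.foldl (pvSearchStep c) (seen, rest)
      pvBfsLoop productos fuel st.1 st.2

-- one step of the inner 'for p, pr in productos' of the evaluation loop; Python's
-- 'memo[c - p]' is ported as getD: the key is always present because the reachable
-- set is closed under c ↦ c - p (proved below), so the KeyError branch is dead.
def pvEvalStep (c : Int) (memo : PySem.Dict Int Int) (best : Int) (pp : Int × Int) : Int :=
  if 0 < pp.1 ∧ pp.1 ≤ c then
    let v := PySem.Dict.getD memo (c - pp.1) 0 + pp.2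
    if v > best then v else best
  else best

def max_precio_con_todos_alt (productos : List (Int × Int)) (K : Int) : Int :=
  let peso_minimo := (productos.map Prod.fst).sum
  if peso_minimo > K then -1
  else
    let precio_base := (productos.map Prod.snd).sum
    let peso_restante := K - peso_minimo
    let seen := pvBfsLoop productos ((peso_restante + 1).toNat + 1) [peso_restante] [peso_restante]
    let memo := (PySem.List.sorted seen (fun x => x) false).foldl
      (fun memo c => memo.insert c (productos.foldl (pvEvalStep c memo) 0)) PySem.Dict.empty
    precio_base + PySem.Dict.getD memo peso_restante 0

-- ===== PRECONDITION & SPEC =====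
-- Pre_ excludes inputs that reach phase 3 (sum of weights ≤ K) with a nonpositive weight:
-- a negative weight always makes A raise IndexError, and for a zero-weight item the unbounded
-- problem is ill-defined, so A's counting of it exactly once is an accident of range(0, …)
-- (B's guard 0 < peso ignores such items).
def Pre_max_precio_con_todos (productos : List (Int × Int)) (K : Int) : Prop :=
  (productos.map Prod.fst).sum > K ∨ ∀ pp ∈ productos, 1 ≤ pp.1
instance (productos : List (Int × Int)) (K : Int) : Decidable (Pre_max_precio_con_todos productos K) := by unfold Pre_max_precio_con_todos; infer_instance

def pvWitness_max_precio_con_todos : (List (Int × Int)) × Int := ([(2, 3), (3, 4)], 10)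

def Spec_max_precio_con_todos (productos : List (Int × Int)) (K : Int) (out : Int) : Prop := out = max_precio_con_todos_alt productos K
instance (productos : List (Int × Int)) (K : Int) (out : Int) : Decidable (Spec_max_precio_con_todos productos K out) := by unfold Spec_max_precio_con_todos; infer_instance

-- ===== CLAIM (what is proved, stated in full; the proofs are below) =====
def Claim_equal_max_precio_con_todos : Prop := ∀ (productos : List (Int × Int)) (K : Int), Dom_max_precio_con_todos productos K → Pre_max_precio_con_todos productos K → Spec_max_precio_con_todos productos K (max_precio_con_todos productos K)

-- ===== LEMMAS AND PROOFS =====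

-- Capacity-indexed value function of the unbounded knapsack: pvMejor L rem c b folds the
-- Bellman maximization for capacity c over the remaining items rem, accumulator b
-- (recursive calls use the full L).
def pvMejor (L : List (Int × Int)) : List (Int × Int) → Nat → Int → Int
  | [], _, b => b
  | pp :: rest, c, b =>
    if _h : 0 < pp.1 ∧ pp.1 ≤ (c : Int) then
      pvMejor L rest c (max b (pvMejor L L (c - pp.1.toNat) 0 + pp.2))
    else
      pvMejor L rest c b
termination_by rem c _b => (c, rem.length)
decreasing_by
  all_goals first
    | exact Prod.Lex.left _ _ (by omega)
    | exact Prod.Lex.right _ (by simp [List.length_cons])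

def pvM (L : List (Int × Int)) (c : Nat) : Int := pvMejor L L c 0

-- One in-place forward relaxation sweep, as a function on table models.
def pvRel (p : Nat) (pr : Int) (f : Nat → Int) : Nat → Int
  | k =>
    if _h : 0 < p ∧ p ≤ k then max (f k) (pvRel p pr f (k - p) + pr) else f k
termination_by k => k
decreasing_by omega

def pvFoldA (L : List (Int × Int)) (f : Nat → Int) : Nat → Int :=
  L.foldl (fun f pp => pvRel pp.1.toNat pp.2 f) f

def pvStable (f : Nat → Int) (S : List (Int × Int)) : Prop :=
  ∀ k : Nat, ∀ pp ∈ S, 0 < pp.1 → pp.1 ≤ (k : Int) → f (k - pp.1.toNat) + pp.2 ≤ f k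

theorem pvMejor_ge_acc (L rem : List (Int × Int)) (c : Nat) (b : Int) : b ≤ pvMejor L rem c b := by
  induction rem generalizing b with
  | nil => rw [pvMejor]
  | cons pp rest ih =>
    rw [pvMejor]
    split
    · exact le_trans (le_max_left _ _) (ih _)
    · exact ih _

theorem pvMejor_ge_item (L rem : List (Int × Int)) (c : Nat) (b : Int) {pp : Int × Int}
    (hmem : pp ∈ rem) (h1 : 0 < pp.1) (h2 : pp.1 ≤ (c : Int)) :
    pvM L (c - pp.1.toNat) + pp.2 ≤ pvMejor L rem c b := by
  induction rem generalizing b with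
  | nil => cases hmem
  | cons qq rest ih =>
    rcases List.mem_cons.mp hmem with rfl | hmem'
    · rw [pvMejor, dif_pos ⟨h1, h2⟩]
      exact le_trans (le_max_right _ _) (pvMejor_ge_acc L rest c _)
    · rw [pvMejor]
      split
      · exact ih _ hmem'
      · exact ih _ hmem'

theorem pvM_nonneg (L : List (Int × Int)) (c : Nat) : 0 ≤ pvM L c :=
  pvMejor_ge_acc L L c 0

theorem pvRel_ge (p : Nat) (pr : Int) (f : Nat → Int) (k : Nat) : f k ≤ pvRel p pr f k := by
  rw [pvRel]
  split
  · exact le_max_left _ _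
  · exact le_rfl

theorem pvRel_congr (p : Nat) (pr : Int) {f g : Nat → Int} (k : Nat)
    (h : ∀ j ≤ k, f j = g j) : pvRel p pr f k = pvRel p pr g k := by
  induction k using Nat.strong_induction_on with
  | _ k ih =>
    rw [pvRel]
    conv_rhs => rw [pvRel]
    by_cases hg : 0 < p ∧ p ≤ k
    · rw [dif_pos hg, dif_pos hg, h k le_rfl,
        ih (k - p) (by omega) (fun j hj => h j (by omega))]
    · rw [dif_neg hg, dif_neg hg]
      exact h k le_rfl

-- upper bound: one sweep keeps the table pointwise below pvM
theorem pvRel_le_M (L : List (Int × Int)) {pp : Int × Int} (hmem : pp ∈ L) (hw : 1 ≤ pp.1)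
    {f : Nat → Int} (hf : ∀ j, f j ≤ pvM L j) (k : Nat) :
    pvRel pp.1.toNat pp.2 f k ≤ pvM L k := by
  induction k using Nat.strong_induction_on with
  | _ k ih =>
    rw [pvRel]
    split
    · rename_i hg
      have hrec := ih (k - pp.1.toNat) (by omega)
      have hitem : pvM L (k - pp.1.toNat) + pp.2 ≤ pvM L k :=
        pvMejor_ge_item L L k 0 hmem (by omega) (by omega)
      refine max_le (hf k) ?_
      linarith
    · exact hf k

-- stability: one sweep makes the new item stable and keeps old items stable
theorem pvRel_stable (S : List (Int × Int)) {pp : Int × Int} (hw : 1 ≤ pp.1)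
    (hS : ∀ q ∈ S, 1 ≤ q.1) {f : Nat → Int} (hst : pvStable f S) :
    pvStable (pvRel pp.1.toNat pp.2 f) (pp :: S) := by
  intro k
  induction k using Nat.strong_induction_on with
  | _ k ih =>
    intro y hy h1 h2
    rcases List.mem_cons.mp hy with rfl | hyS
    · have hpk : y.1.toNat ≤ k := by omega
      have ek : pvRel y.1.toNat y.2 f k =
          max (f k) (pvRel y.1.toNat y.2 f (k - y.1.toNat) + y.2) := by
        rw [pvRel, dif_pos ⟨by omega, hpk⟩]
      rw [ek]
      exact le_max_right _ _
    · have hq1 : 1 ≤ y.1 := hS y hyS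
      have hqk : y.1.toNat ≤ k := by omega
      by_cases hpk : pp.1.toNat ≤ k
      · have ek : pvRel pp.1.toNat pp.2 f k =
            max (f k) (pvRel pp.1.toNat pp.2 f (k - pp.1.toNat) + pp.2) := by
          rw [pvRel, dif_pos ⟨by omega, hpk⟩]
        by_cases hpq : pp.1.toNat ≤ k - y.1.toNat
        · have ekq : pvRel pp.1.toNat pp.2 f (k - y.1.toNat) =
              max (f (k - y.1.toNat))
                (pvRel pp.1.toNat pp.2 f (k - y.1.toNat - pp.1.toNat) + pp.2) := by
            rw [pvRel, dif_pos ⟨by omega, hpq⟩]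
          have h3 : f (k - y.1.toNat) + y.2 ≤ pvRel pp.1.toNat pp.2 f k :=
            le_trans (hst k y hyS h1 h2) (pvRel_ge _ _ _ _)
          have hih := ih (k - pp.1.toNat) (by omega) y (List.mem_cons_of_mem _ hyS) h1 (by omega)
          rw [show k - pp.1.toNat - y.1.toNat = k - y.1.toNat - pp.1.toNat from by omega] at hih
          have h5 : pvRel pp.1.toNat pp.2 f (k - pp.1.toNat) + pp.2 ≤
              pvRel pp.1.toNat pp.2 f k := by rw [ek]; exact le_max_right _ _
          rw [ekq, ← max_add_add_right]
          exact max_le h3 (by linarith)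
        · have ekq : pvRel pp.1.toNat pp.2 f (k - y.1.toNat) = f (k - y.1.toNat) := by
            rw [pvRel, dif_neg (fun hc => hpq hc.2)]
          rw [ekq]
          exact le_trans (hst k y hyS h1 h2) (pvRel_ge _ _ _ _)
      · have ek : pvRel pp.1.toNat pp.2 f k = f k := by
          rw [pvRel, dif_neg (fun hc => hpk hc.2)]
        have ekq : pvRel pp.1.toNat pp.2 f (k - y.1.toNat) = f (k - y.1.toNat) := by
          rw [pvRel, dif_neg (fun hc => hpk (by omega))]
        rw [ek, ekq]
        exact hst k y hyS h1 h2

theorem pvStable_subset {f : Nat → Int} {S T : List (Int × Int)}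
    (hsub : ∀ x ∈ S, x ∈ T) (h : pvStable f T) : pvStable f S :=
  fun k pp hm => h k pp (hsub pp hm)

theorem pvFoldA_ge (L : List (Int × Int)) (f : Nat → Int) (k : Nat) : f k ≤ pvFoldA L f k := by
  induction L generalizing f with
  | nil => exact le_rfl
  | cons pp rest ih =>
    exact le_trans (pvRel_ge pp.1.toNat pp.2 f k) (ih (pvRel pp.1.toNat pp.2 f))

theorem pvFoldA_stable_aux (rem : List (Int × Int)) :
    ∀ (S : List (Int × Int)) (f : Nat → Int), pvStable f S → (∀ q ∈ S, 1 ≤ q.1) →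
      (∀ q ∈ rem, 1 ≤ q.1) → pvStable (rem.foldl (fun f pp => pvRel pp.1.toNat pp.2 f) f) (rem ++ S) := by
  induction rem with
  | nil => intro S f hst _ _; simpa using hst
  | cons pp rest ih =>
    intro S f hst hS hrem
    have h1 : pvStable (pvRel pp.1.toNat pp.2 f) (pp :: S) :=
      pvRel_stable S (hrem pp (List.mem_cons_self ..)) hS hst
    have h2 := ih (pp :: S) (pvRel pp.1.toNat pp.2 f) h1
      (by intro q hq; rcases List.mem_cons.mp hq with rfl | hq
          · exact hrem q (List.mem_cons_self ..)
          · exact hS q hq)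
      (fun q hq => hrem q (List.mem_cons_of_mem _ hq))
    refine pvStable_subset (fun x hx => ?_) h2
    simp only [List.mem_append, List.mem_cons] at hx ⊢
    tauto

theorem pvFoldA_stable (L : List (Int × Int)) (hL : ∀ q ∈ L, 1 ≤ q.1) :
    pvStable (pvFoldA L (fun _ => 0)) L := by
  have h := pvFoldA_stable_aux L [] (fun _ => 0) (by intro k pp hpp; cases hpp) (by simp) hL
  refine pvStable_subset (fun x hx => ?_) h
  simpa using hx

theorem pvFoldA_le_M_aux (L : List (Int × Int)) (rem : List (Int × Int))
    (hrem : ∀ q ∈ rem, q ∈ L ∧ 1 ≤ q.1) :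
    ∀ (f : Nat → Int), (∀ j, f j ≤ pvM L j) →
      ∀ k, (rem.foldl (fun f pp => pvRel pp.1.toNat pp.2 f) f) k ≤ pvM L k := by
  induction rem with
  | nil => intro f hf k; exact hf k
  | cons pp rest ih =>
    intro f hf k
    have hpp := hrem pp (List.mem_cons_self ..)
    exact ih (fun q hq => hrem q (List.mem_cons_of_mem _ hq)) _
      (fun j => pvRel_le_M L hpp.1 hpp.2 hf j) k

theorem pvFoldA_le_M (L : List (Int × Int)) (hL : ∀ q ∈ L, 1 ≤ q.1) (k : Nat) :
    pvFoldA L (fun _ => 0) k ≤ pvM L k :=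
  pvFoldA_le_M_aux L L (fun q hq => ⟨hq, hL q hq⟩) _ (fun j => pvM_nonneg L j) k

theorem pvM_le_of_stable (L : List (Int × Int)) {g : Nat → Int} (hst : pvStable g L)
    (hnn : ∀ j, 0 ≤ g j) (c : Nat) : pvM L c ≤ g c := by
  induction c using Nat.strong_induction_on with
  | _ c ih =>
    suffices h : ∀ rem, (∀ q ∈ rem, q ∈ L) → ∀ b, b ≤ g c → pvMejor L rem c b ≤ g c from
      h L (fun _ hq => hq) 0 (hnn c)
    intro rem
    induction rem with
    | nil => intro _ b hb; rw [pvMejor]; exact hb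
    | cons pp rest ihrem =>
      intro hsub b hb
      rw [pvMejor]
      split
      · rename_i hg
        refine ihrem (fun q hq => hsub q (List.mem_cons_of_mem _ hq)) _ (max_le hb ?_)
        have hlt : c - pp.1.toNat < c := by omega
        have hih : pvM L (c - pp.1.toNat) ≤ g (c - pp.1.toNat) := ih _ hlt
        have hstp : g (c - pp.1.toNat) + pp.2 ≤ g c :=
          hst c pp (hsub pp (List.mem_cons_self ..)) hg.1 hg.2
        show pvM L (c - pp.1.toNat) + pp.2 ≤ g c
        linarith
      · exact ihrem (fun q hq => hsub q (List.mem_cons_of_mem _ hq)) _ hb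

-- the heart of the A side: item-major table = value function
theorem pvFoldA_eq_M (L : List (Int × Int)) (hL : ∀ q ∈ L, 1 ≤ q.1) (k : Nat) :
    pvFoldA L (fun _ => 0) k = pvM L k :=
  le_antisymm (pvFoldA_le_M L hL k)
    (pvM_le_of_stable L (pvFoldA_stable L hL) (fun j => pvFoldA_ge L _ j) k)

-- ---- bridge A: the list program computes the model ----

theorem pvGetD_set (l : List Int) (i j : Nat) (v : Int) (hi : i < l.length) :
    (l.set i v).getD j 0 = if j = i then v else l.getD j 0 := by
  rcases eq_or_ne j i with rfl | hne
  · simp [List.getD_eq_getElem?_getD, hi]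
  · simp [List.getD_eq_getElem?_getD, List.getElem?_set_ne (by omega : i ≠ j), hne]

theorem pvSweep (p pr : Int) (hp : 1 ≤ p) (dp : List Int) :
    ∀ m : Nat, p.toNat - 1 ≤ m → m < dp.length →
      ((PySem.List.pyRange p ((m : Int) + 1) 1).foldl
        (fun dp k => PySem.List.pySetD dp k
          (max (PySem.List.pyGetD dp k 0) (PySem.List.pyGetD dp (k - p) 0 + pr))) dp).length = dp.length ∧
      ∀ k, k < dp.length →
        ((PySem.List.pyRange p ((m : Int) + 1) 1).foldl
          (fun dp k => PySem.List.pySetD dp k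
            (max (PySem.List.pyGetD dp k 0) (PySem.List.pyGetD dp (k - p) 0 + pr))) dp).getD k 0 =
          if k ≤ m then pvRel p.toNat pr (fun j => dp.getD j 0) k else dp.getD k 0 := by
  intro m hm
  induction m, hm using Nat.le_induction with
  | base =>
    intro _hlen
    have he : ((p.toNat - 1 : Nat) : Int) + 1 = p := by omega
    rw [he, PySem.List.pyRange_one_eq_nil le_rfl]
    refine ⟨rfl, fun k hk => ?_⟩
    rw [List.foldl_nil]
    split
    · rw [pvRel, dif_neg (by omega)]
    · rfl
  | succ m hm ihm =>
    intro hlen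
    have prev := ihm (by omega)
    obtain ⟨plen, pget⟩ := prev
    have hcast : ((m + 1 : Nat) : Int) + 1 = ((m : Int) + 1) + 1 := by push_cast; ring
    have hsplit : PySem.List.pyRange p (((m + 1 : Nat) : Int) + 1) 1 =
        PySem.List.pyRange p ((m : Int) + 1) 1 ++ [(m : Int) + 1] := by
      rw [hcast, PySem.List.pyRange_one_succ_right (by omega)]
    rw [hsplit, List.foldl_append, List.foldl_cons, List.foldl_nil]
    set L := (PySem.List.pyRange p ((m : Int) + 1) 1).foldl
        (fun dp k => PySem.List.pySetD dp k
          (max (PySem.List.pyGetD dp k 0) (PySem.List.pyGetD dp (k - p) 0 + pr))) dp with hL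
    have e1 : ((m : Int) + 1) = ((m + 1 : Nat) : Int) := by push_cast; ring
    have e2 : ((m : Int) + 1 - p) = ((m + 1 - p.toNat : Nat) : Int) := by omega
    have hget1 : PySem.List.pyGetD L ((m : Int) + 1) 0 = dp.getD (m + 1) 0 := by
      rw [e1, PySem.List.pyGetD_natCast, pget (m + 1) hlen, if_neg (by omega)]
    have hget2 : PySem.List.pyGetD L ((m : Int) + 1 - p) 0 =
        pvRel p.toNat pr (fun j => dp.getD j 0) (m + 1 - p.toNat) := by
      rw [e2, PySem.List.pyGetD_natCast, pget (m + 1 - p.toNat) (by omega),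
        if_pos (by omega)]
    rw [hget1, hget2, e1, PySem.List.pySetD_natCast]
    refine ⟨by rw [List.length_set]; exact plen, fun k hk => ?_⟩
    rw [pvGetD_set L (m + 1) k _ (by omega)]
    rcases eq_or_ne k (m + 1) with rfl | hne
    · rw [if_pos rfl, if_pos (by omega)]
      conv_rhs => rw [pvRel]
      rw [dif_pos (⟨by omega, by omega⟩ : 0 < p.toNat ∧ p.toNat ≤ m + 1)]
    · rw [if_neg hne, pget k hk]
      by_cases hkm : k ≤ m
      · rw [if_pos hkm, if_pos (by omega)]
      · rw [if_neg hkm, if_neg (by omega)]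

theorem pvRelaxItem_char (R : Int) (hR : 0 ≤ R) (p pr : Int) (hp : 1 ≤ p) (dp : List Int)
    (hlen : dp.length = (R + 1).toNat) :
    (pvRelaxItem R p pr dp).length = dp.length ∧
    ∀ k : Nat, k < dp.length →
      (pvRelaxItem R p pr dp).getD k 0 = pvRel p.toNat pr (fun j => dp.getD j 0) k := by
  unfold pvRelaxItem
  by_cases hcase : p ≤ R
  · have h := pvSweep p pr hp dp R.toNat (by omega) (by omega)
    have ecast : ((R.toNat : Nat) : Int) + 1 = R + 1 := by omega
    rw [ecast] at h
    exact ⟨h.1, fun k hk => by rw [h.2 k hk, if_pos (by omega)]⟩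
  · rw [PySem.List.pyRange_one_eq_nil (by omega)]
    refine ⟨rfl, fun k hk => ?_⟩
    rw [List.foldl_nil, pvRel, dif_neg (by omega)]

theorem pvFoldA_congr (rem : List (Int × Int)) {N : Nat} {f g : Nat → Int}
    (h : ∀ j < N, f j = g j) : ∀ k, k < N → pvFoldA rem f k = pvFoldA rem g k := by
  induction rem generalizing f g with
  | nil => exact fun k hk => h k hk
  | cons pp rest ih =>
    intro k hk
    simp only [pvFoldA, List.foldl_cons]
    exact ih (fun j hj => pvRel_congr _ _ j (fun i hi => h i (by omega))) k hk

theorem pvFoldA_bridge (R : Int) (hR : 0 ≤ R) (rem : List (Int × Int)) :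
    ∀ (dp : List Int), (∀ q ∈ rem, 1 ≤ q.1) → dp.length = (R + 1).toNat →
      (rem.foldl (fun dp pp => pvRelaxItem R pp.1 pp.2 dp) dp).length = dp.length ∧
      ∀ k : Nat, k < dp.length →
        (rem.foldl (fun dp pp => pvRelaxItem R pp.1 pp.2 dp) dp).getD k 0 =
          pvFoldA rem (fun j => dp.getD j 0) k := by
  induction rem with
  | nil => exact fun dp _ _ => ⟨rfl, fun k _ => rfl⟩
  | cons pp rest ih =>
    intro dp hrem hlen
    have hpp1 : 1 ≤ pp.1 := hrem pp (List.mem_cons_self ..)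
    obtain ⟨clen, cget⟩ := pvRelaxItem_char R hR pp.1 pp.2 hpp1 dp hlen
    obtain ⟨ilen, iget⟩ := ih (pvRelaxItem R pp.1 pp.2 dp)
      (fun q hq => hrem q (List.mem_cons_of_mem _ hq)) (clen.trans hlen)
    refine ⟨by rw [List.foldl_cons]; rw [ilen, clen], fun k hk => ?_⟩
    rw [List.foldl_cons, iget k (by omega)]
    have hcg := pvFoldA_congr rest (N := dp.length) (fun j hj => cget j hj) k hk
    rw [hcg]
    simp only [pvFoldA, List.foldl_cons]

-- ---- bridge B, stage 1: the reachability loop ----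

-- a Nodup list of integers in [0, R] has at most (R+1).toNat elements
theorem pvLenBound (s : List Int) (R : Int) (hnd : s.Nodup)
    (hb : ∀ x ∈ s, 0 ≤ x ∧ x ≤ R) : s.length ≤ (R + 1).toNat := by
  have hmap : (s.map Int.toNat).Nodup := by
    refine List.Nodup.map_on (fun x hx y hy hxy => ?_) hnd
    have := (hb x hx).1; have := (hb y hy).1; omega
  have hsub : (s.map Int.toNat).toFinset ⊆ Finset.range ((R + 1).toNat) := by
    intro a ha
    rw [List.mem_toFinset] at ha
    obtain ⟨x, hx, rfl⟩ := List.mem_map.mp ha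
    have := hb x hx
    rw [Finset.mem_range]
    omega
  calc s.length = (s.map Int.toNat).length := (List.length_map ..).symm
    _ = (s.map Int.toNat).toFinset.card := (List.toFinset_card_of_nodup hmap).symm
    _ ≤ (Finset.range ((R + 1).toNat)).card := Finset.card_le_card hsub
    _ = (R + 1).toNat := Finset.card_range _

-- specification of the inner 'for p, _ in productos' fold of the search
theorem pvSearch_fold_spec (R : Int) (c : Int) (hc0 : 0 ≤ c) (hcR : c ≤ R) :
    ∀ (ps : List (Int × Int)) (s f : List Int), s.Nodup →
      (∀ x ∈ s, x ∈ (ps.foldl (pvSearchStep c) (s, f)).1) ∧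
      (ps.foldl (pvSearchStep c) (s, f)).1.Nodup ∧
      (∀ x ∈ (ps.foldl (pvSearchStep c) (s, f)).1,
        x ∈ s ∨ (x ∈ (ps.foldl (pvSearchStep c) (s, f)).2 ∧ 0 ≤ x ∧ x ≤ R)) ∧
      (∀ x ∈ (ps.foldl (pvSearchStep c) (s, f)).2, x ∈ f ∨ x ∈ (ps.foldl (pvSearchStep c) (s, f)).1) ∧
      (∀ pp ∈ ps, 0 < pp.1 → pp.1 ≤ c → (c - pp.1) ∈ (ps.foldl (pvSearchStep c) (s, f)).1) ∧
      ((ps.foldl (pvSearchStep c) (s, f)).1.length + f.length =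
        s.length + (ps.foldl (pvSearchStep c) (s, f)).2.length) ∧
      (∀ x ∈ f, x ∈ (ps.foldl (pvSearchStep c) (s, f)).2) := by
  intro ps
  induction ps with
  | nil =>
    intro s f hnd
    refine ⟨fun x hx => hx, hnd, fun x hx => Or.inl hx, fun x hx => Or.inl hx,
      fun pp hpp => absurd hpp (List.not_mem_nil), by simp, fun x hx => hx⟩
  | cons pp rest ih =>
    intro s f hnd
    rw [List.foldl_cons]
    by_cases hg : 0 < pp.1 ∧ pp.1 ≤ c ∧ (c - pp.1) ∉ s
    · have hadd : PySem.Set.add s (c - pp.1) = s ++ [c - pp.1] := by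
        have hif : PySem.Set.add s (c - pp.1) =
            if (c - pp.1) ∈ s then s else s ++ [c - pp.1] := by
          simp [PySem.Set.add, PySem.Set.contains]
        rw [hif, if_neg hg.2.2]
      have hstep : pvSearchStep c (s, f) pp = (s ++ [c - pp.1], (c - pp.1) :: f) := by
        simp only [pvSearchStep, if_pos hg]
        rw [hadd]
      rw [hstep]
      have hnd1 : (s ++ [c - pp.1]).Nodup := by
        refine hnd.append (List.nodup_singleton _) ?_
        intro a ha hb
        simp only [List.mem_singleton] at hb
        subst hb
        exact hg.2.2 ha
      obtain ⟨ha, hb, hc', hd, he, hf, hgmono⟩ := ih (s ++ [c - pp.1]) ((c - pp.1) :: f) hnd1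
      refine ⟨fun x hx => ha x (by simp [hx]), hb, ?_, ?_, ?_, ?_, ?_⟩
      · intro x hx
        rcases hc' x hx with hx1 | hx2
        · rcases List.mem_append.mp hx1 with hx1 | hx1
          · exact Or.inl hx1
          · simp only [List.mem_singleton] at hx1
            subst hx1
            exact Or.inr ⟨hgmono _ (List.mem_cons_self ..), by omega, by omega⟩
        · exact Or.inr hx2
      · intro x hx
        rcases hd x hx with hx1 | hx1
        · rcases List.mem_cons.mp hx1 with rfl | hx1
          · exact Or.inr (ha _ (by simp))
          · exact Or.inl hx1
        · exact Or.inr hx1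
      · intro qq hqq h1 h2
        rcases List.mem_cons.mp hqq with rfl | hqq
        · exact ha _ (by simp)
        · exact he qq hqq h1 h2
      · simp only [List.length_append, List.length_cons, List.length_nil] at hf ⊢
        omega
      · exact fun x hx => hgmono x (List.mem_cons_of_mem _ hx)
    · have hstep : pvSearchStep c (s, f) pp = (s, f) := by
        simp only [pvSearchStep, if_neg hg]
      rw [hstep]
      obtain ⟨ha, hb, hc', hd, he, hf, hgmono⟩ := ih s f hnd
      refine ⟨ha, hb, hc', hd, ?_, hf, hgmono⟩
      intro qq hqq h1 h2
      rcases List.mem_cons.mp hqq with rfl | hqq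
      · have hmem : (c - qq.1) ∈ s := by
          by_contra hcon
          exact hg ⟨h1, h2, hcon⟩
        exact ha _ hmem
      · exact he qq hqq h1 h2

-- the reachability loop terminates within its fuel and returns a Nodup, bounded set of
-- capacities, containing its seeds and closed under c ↦ c - peso for every usable item
theorem pvBfs_spec (ps : List (Int × Int)) (R : Int) :
    ∀ (fuel : Nat) (s f : List Int), s.Nodup → (∀ x ∈ s, 0 ≤ x ∧ x ≤ R) →
      (∀ x ∈ f, x ∈ s) →
      (∀ c ∈ s, c ∈ f ∨ ∀ pp ∈ ps, 0 < pp.1 → pp.1 ≤ c → (c - pp.1) ∈ s) →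
      f.length + ((R + 1).toNat - s.length) ≤ fuel →
      (∀ x ∈ s, x ∈ pvBfsLoop ps fuel s f) ∧
      (pvBfsLoop ps fuel s f).Nodup ∧
      (∀ x ∈ pvBfsLoop ps fuel s f, 0 ≤ x ∧ x ≤ R) ∧
      (∀ c ∈ pvBfsLoop ps fuel s f, ∀ pp ∈ ps, 0 < pp.1 → pp.1 ≤ c →
        (c - pp.1) ∈ pvBfsLoop ps fuel s f) := by
  intro fuel
  induction fuel with
  | zero =>
    intro s f hnd hb hfs hcl hfuel
    have hf : f = [] := List.length_eq_zero_iff.mp (by omega)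
    subst hf
    rw [pvBfsLoop]
    refine ⟨fun x hx => hx, hnd, hb, fun c hc => ?_⟩
    rcases hcl c hc with h | h
    · cases h
    · exact h
  | succ fuel ih =>
    intro s f hnd hb hfs hcl hfuel
    match f with
    | [] =>
      rw [pvBfsLoop]
      refine ⟨fun x hx => hx, hnd, hb, fun c hc => ?_⟩
      rcases hcl c hc with h | h
      · cases h
      · exact h
    | c :: rest =>
      have hcs := hb c (hfs c (List.mem_cons_self ..))
      obtain ⟨ha, hnd', hc', hd, he, hlen', hgmono⟩ :=
        pvSearch_fold_spec R c hcs.1 hcs.2 ps s rest hnd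
      set st := ps.foldl (pvSearchStep c) (s, rest) with hst
      have hb' : ∀ x ∈ st.1, 0 ≤ x ∧ x ≤ R := by
        intro x hx
        rcases hc' x hx with h | h
        · exact hb x h
        · exact h.2
      have hfs' : ∀ x ∈ st.2, x ∈ st.1 := by
        intro x hx
        rcases hd x hx with h | h
        · exact ha x (hfs x (List.mem_cons_of_mem _ h))
        · exact h
      have hcl' : ∀ c' ∈ st.1, c' ∈ st.2 ∨
          ∀ pp ∈ ps, 0 < pp.1 → pp.1 ≤ c' → (c' - pp.1) ∈ st.1 := by
        intro c' hc1
        rcases hc' c' hc1 with hin | hnew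
        · rcases hcl c' hin with hfr | hdeps
          · rcases List.mem_cons.mp hfr with rfl | hr
            · exact Or.inr he
            · exact Or.inl (hgmono c' hr)
          · exact Or.inr (fun pp hpp h1 h2 => ha _ (hdeps pp hpp h1 h2))
        · exact Or.inl hnew.1
      have hT1 : s.length ≤ (R + 1).toNat := pvLenBound s R hnd hb
      have hT2 : st.1.length ≤ (R + 1).toNat := pvLenBound st.1 R hnd' hb'
      have hfuel' : st.2.length + ((R + 1).toNat - st.1.length) ≤ fuel := by
        simp only [List.length_cons] at hfuel
        omega
      have hrec := ih st.1 st.2 hnd' hb' hfs' hcl' hfuel'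
      rw [pvBfsLoop]
      exact ⟨fun x hx => hrec.1 x (ha x hx), hrec.2.1, hrec.2.2.1, hrec.2.2.2⟩

-- ---- bridge B, stage 2: evaluation in increasing order ----

-- the inner evaluation fold computes the value function, given correct memo entries
-- for the dependencies
theorem pvEval_fold (L : List (Int × Int)) (c : Int) (hc : 0 ≤ c) (M : PySem.Dict Int Int)
    (hM : ∀ pp ∈ L, 0 < pp.1 → pp.1 ≤ c →
      M.getD (c - pp.1) 0 = pvM L (c - pp.1).toNat) :
    L.foldl (pvEvalStep c M) 0 = pvM L c.toNat := by
  suffices h : ∀ rem, (∀ pp ∈ rem, pp ∈ L) → ∀ b,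
      rem.foldl (pvEvalStep c M) b = pvMejor L rem c.toNat b from
    h L (fun _ hq => hq) 0
  intro rem
  induction rem with
  | nil => intro _ b; rw [List.foldl_nil, pvMejor]
  | cons pp rest ih =>
    intro hsub b
    rw [List.foldl_cons]
    by_cases hg : 0 < pp.1 ∧ pp.1 ≤ c
    · have hgn : 0 < pp.1 ∧ pp.1 ≤ ((c.toNat : Nat) : Int) := by
        constructor
        · exact hg.1
        · omega
      rw [pvMejor, dif_pos hgn]
      have hstep : pvEvalStep c M b pp =
          max b (pvMejor L L (c.toNat - pp.1.toNat) 0 + pp.2) := by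
        simp only [pvEvalStep, if_pos hg]
        have hMv := hM pp (hsub pp (List.mem_cons_self ..)) hg.1 hg.2
        have hidx : (c - pp.1).toNat = c.toNat - pp.1.toNat := by omega
        rw [hMv, hidx]
        unfold pvM
        split <;> omega
      rw [hstep]
      exact ih (fun q hq => hsub q (List.mem_cons_of_mem _ hq)) _
    · have hgn : ¬ (0 < pp.1 ∧ pp.1 ≤ ((c.toNat : Nat) : Int)) := by
        intro hcon
        exact hg ⟨hcon.1, by omega⟩
      rw [pvMejor, dif_neg hgn]
      have hstep : pvEvalStep c M b pp = b := by
        simp only [pvEvalStep, if_neg hg]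
      rw [hstep]
      exact ih (fun q hq => hsub q (List.mem_cons_of_mem _ hq)) _

-- the evaluation loop fills the memo with the value function, processing the reachable
-- capacities in strictly increasing order
theorem pvEvalLoop (L : List (Int × Int)) :
    ∀ (todo done : List Int) (M : PySem.Dict Int Int),
      (done ++ todo).Pairwise (· < ·) →
      (∀ c ∈ todo, 0 ≤ c) →
      (∀ c ∈ todo, ∀ pp ∈ L, 0 < pp.1 → pp.1 ≤ c → (c - pp.1) ∈ done ++ todo) →
      (∀ d ∈ done, M.getD d 0 = pvM L d.toNat) →
      ∀ x ∈ done ++ todo,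
        (todo.foldl (fun M c => M.insert c (L.foldl (pvEvalStep c M) 0)) M).getD x 0 =
          pvM L x.toNat := by
  intro todo
  induction todo with
  | nil =>
    intro done M _ _ _ hdone x hx
    rw [List.foldl_nil]
    exact hdone x (by simpa using hx)
  | cons c todo' ih =>
    intro done M hpw hnn hdeps hdone x hx
    have hc0 : 0 ≤ c := hnn c (List.mem_cons_self ..)
    have hpw2 := List.pairwise_append.mp hpw
    have hclt : ∀ y ∈ todo', c < y := (List.pairwise_cons.mp hpw2.2.1).1
    have hdlt : ∀ d ∈ done, d < c :=
      fun d hd => hpw2.2.2 d hd c (List.mem_cons_self ..)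
    have hdepdone : ∀ pp ∈ L, 0 < pp.1 → pp.1 ≤ c → (c - pp.1) ∈ done := by
      intro pp hpp h1 h2
      have hmem := hdeps c (List.mem_cons_self ..) pp hpp h1 h2
      rcases List.mem_append.mp hmem with h | h
      · exact h
      · rcases List.mem_cons.mp h with heq | h
        · omega
        · have := hclt _ h; omega
    have hv : L.foldl (pvEvalStep c M) 0 = pvM L c.toNat := by
      refine pvEval_fold L c hc0 M (fun pp hpp h1 h2 => ?_)
      exact hdone _ (hdepdone pp hpp h1 h2)
    rw [List.foldl_cons]
    have hassoc : done ++ c :: todo' = (done ++ [c]) ++ todo' := by simp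
    have hdone' : ∀ d ∈ done ++ [c],
        (M.insert c (L.foldl (pvEvalStep c M) 0)).getD d 0 = pvM L d.toNat := by
      intro d hd
      rcases List.mem_append.mp hd with hd | hd
      · rw [PySem.Dict.getD_insert, if_neg (by have := hdlt d hd; omega)]
        exact hdone d hd
      · simp only [List.mem_singleton] at hd
        subst hd
        rw [PySem.Dict.getD_insert, if_pos rfl]
        exact hv
    have hrec := ih (done ++ [c]) (M.insert c (L.foldl (pvEvalStep c M) 0))
      (by rw [← hassoc]; exact hpw)
      (fun c' hc' => hnn c' (List.mem_cons_of_mem _ hc'))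
      (by intro c' hc' pp hpp h1 h2
          rw [← hassoc]
          exact hdeps c' (List.mem_cons_of_mem _ hc') pp hpp h1 h2)
      hdone'
      x (by rw [← hassoc]; exact hx)
    exact hrec

-- ===== VERDICT (by name: the statement is the Claim_ definition above) =====
theorem max_precio_con_todos_spec : Claim_equal_max_precio_con_todos := by
  intro productos K _hdom hpre
  unfold Spec_max_precio_con_todos
  simp only [max_precio_con_todos, max_precio_con_todos_alt]
  by_cases hgt : (productos.map Prod.fst).sum > K
  · rw [if_pos hgt, if_pos hgt]
  · rw [if_neg hgt, if_neg hgt]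
    have hw : ∀ pp ∈ productos, 1 ≤ pp.1 := by
      rcases hpre with h | h
      · exact absurd h hgt
      · exact h
    have hR : 0 ≤ K - (productos.map Prod.fst).sum := by omega
    set R := K - (productos.map Prod.fst).sum with hRdef
    congr 1
    have hRidx : R = ((R.toNat : Nat) : Int) := by omega
    rw [hRidx]
    -- A side
    obtain ⟨blen, bget⟩ :=
      pvFoldA_bridge ((R.toNat : Nat) : Int) (by omega) productos
        (List.replicate (((R.toNat : Nat) : Int) + 1).toNat (0 : Int)) hw
        List.length_replicate
    rw [PySem.List.pyGetD_natCast,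
      bget R.toNat (by rw [List.length_replicate]; omega)]
    have hzero : (fun j => (List.replicate (((R.toNat : Nat) : Int) + 1).toNat (0 : Int)).getD j 0) =
        (fun _ => (0 : Int)) := by
      funext j
      rw [List.getD_eq_getElem?_getD, List.getElem?_replicate]
      split <;> rfl
    rw [hzero, pvFoldA_eq_M productos hw R.toNat]
    -- B side
    obtain ⟨hsub, hnd, hbnd, hcl⟩ :=
      pvBfs_spec productos ((R.toNat : Nat) : Int) ((((R.toNat : Nat) : Int) + 1).toNat + 1)
        [((R.toNat : Nat) : Int)] [((R.toNat : Nat) : Int)]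
        (by simp)
        (by intro x hx; simp only [List.mem_singleton] at hx; subst hx; omega)
        (by intro x hx; exact hx)
        (by intro c hc; exact Or.inl (by simpa using hc))
        (by simp only [List.length_singleton]; omega)
    set S := pvBfsLoop productos ((((R.toNat : Nat) : Int) + 1).toNat + 1)
      [((R.toNat : Nat) : Int)] [((R.toNat : Nat) : Int)] with hS
    have hRS : ((R.toNat : Nat) : Int) ∈ S := hsub _ (by simp)
    have hperm : (PySem.List.sorted S (fun x => x) false).Perm S :=
      PySem.List.sorted_perm ..
    have hndL : (PySem.List.sorted S (fun x => x) false).Nodup :=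
      (hperm.nodup_iff).mpr hnd
    have hple : (PySem.List.sorted S (fun x => x) false).Pairwise (· ≤ ·) := by
      have := PySem.List.sorted_pairwise (xs := S) (key := fun x => x)
      simpa using this
    have hplt : (PySem.List.sorted S (fun x => x) false).Pairwise (· < ·) :=
      (hple.and hndL).imp (fun h => lt_of_le_of_ne h.1 h.2)
    have hmemS : ∀ x, x ∈ PySem.List.sorted S (fun x => x) false ↔ x ∈ S :=
      fun x => hperm.mem_iff
    have hfin := pvEvalLoop productos (PySem.List.sorted S (fun x => x) false) []
      PySem.Dict.empty
      (by simpa using hplt)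
      (fun c hc => (hbnd c ((hmemS c).mp hc)).1)
      (by intro c hc pp hpp h1 h2
          have hdep := hcl c ((hmemS c).mp hc) pp hpp h1 h2
          simpa using (hmemS _).mpr hdep)
      (by intro d hd; cases hd)
      ((R.toNat : Nat) : Int) (by simpa using (hmemS _).mpr hRS)
    rw [Int.toNat_natCast] at hfin
    exact hfin.symm
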